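-- pv_equiv track=rewrite | github.com/MisterSilvereagle/cryptions | foursquare.py | __split_into_bigrams
-- ===== SOURCE A (Python) =====
-- def __split_into_bigrams(inp: list) -> list:
--     temp = []
--     _ = []
--     for m in inp:
--         if len(_) == 0:
--             _.append(m)
--         else:
--             _.append(m)
--             temp.append(_)
--             _ = []
--     if _ != []:
--         _.append('X')
--         temp.append(_)
--         _ = []
--     return temp
-- ===== SOURCE B (Python) =====
-- def __split_into_bigrams(inp: list) -> list:
--     padded = list(inp)
--     if len(padded) % 2 == 1:
--         padded.append('X')
--     return [padded[i:i + 2] for i in range(0, len(padded), 2)]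
-- ===== Notes on version B (the rewrite author's own statement) =====
-- stated objective: simpler
-- what changed: Replaces the toggle-buffer accumulation loop with pad-then-chunk: copy the input, append 'X' if the length is odd, then slice the padded list into consecutive pairs.
import Mathlib
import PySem

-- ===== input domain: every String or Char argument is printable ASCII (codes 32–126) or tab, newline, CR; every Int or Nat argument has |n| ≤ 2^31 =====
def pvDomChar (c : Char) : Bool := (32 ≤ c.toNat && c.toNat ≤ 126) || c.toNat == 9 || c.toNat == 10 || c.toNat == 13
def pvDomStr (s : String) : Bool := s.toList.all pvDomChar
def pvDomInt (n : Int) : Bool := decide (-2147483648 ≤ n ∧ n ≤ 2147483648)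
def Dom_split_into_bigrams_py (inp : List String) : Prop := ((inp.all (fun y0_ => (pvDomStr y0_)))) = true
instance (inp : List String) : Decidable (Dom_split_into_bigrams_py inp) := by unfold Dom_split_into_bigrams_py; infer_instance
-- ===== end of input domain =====

-- B replaces A's toggle-buffer loop by pad-then-chunk (copy, append 'X' if odd length, slice into pairs): simpler decomposition, same cost.


-- ===== PORT A =====
-- literal port of A: fold the loop over (temp, buf), then flush the odd buffer with 'X'
def split_into_bigrams_py (inp : List String) : List (List String) :=
  let st := inp.foldl (fun (st : List (List String) × List String) m =>
    let temp := st.1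
    let buf := st.2
    if buf.length = 0 then (temp, buf ++ [m])
    else (temp ++ [buf ++ [m]], [])) ([], [])
  if st.2 ≠ [] then st.1 ++ [st.2 ++ ["X"]] else st.1

-- ===== PORT B =====
-- chunk the padded copy into consecutive pairs ([padded[i:i+2] for i in range(0, len, 2)])
def pvChunk2 : List String → List (List String)
  | a :: b :: rest => [a, b] :: pvChunk2 rest
  | [a] => [[a]]
  | [] => []

def split_into_bigrams_py_alt (inp : List String) : List (List String) :=
  let padded := if inp.length % 2 = 1 then inp ++ ["X"] else inp
  pvChunk2 padded

-- ===== PRECONDITION & SPEC =====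
def Spec_split_into_bigrams_py (inp : List String) (out : List (List String)) : Prop := out = split_into_bigrams_py_alt inp
instance (inp : List String) (out : List (List String)) : Decidable (Spec_split_into_bigrams_py inp out) := by unfold Spec_split_into_bigrams_py; infer_instance

-- ===== CLAIM (what is proved, stated in full; the proofs are below) =====
def Claim_equal_split_into_bigrams_py : Prop := ∀ (inp : List String), Dom_split_into_bigrams_py inp → Spec_split_into_bigrams_py inp (split_into_bigrams_py inp)

-- ===== LEMMAS AND PROOFS =====

-- A's loop from an empty buffer, flushed, equals temp followed by B's pad-then-chunk result.
theorem pv_key (inp : List String) : ∀ (temp : List (List String)),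
    (let st := inp.foldl (fun (st : List (List String) × List String) m =>
        let temp := st.1
        let buf := st.2
        if buf.length = 0 then (temp, buf ++ [m])
        else (temp ++ [buf ++ [m]], [])) (temp, [])
     if st.2 ≠ [] then st.1 ++ [st.2 ++ ["X"]] else st.1)
    = temp ++ pvChunk2 (if inp.length % 2 = 1 then inp ++ ["X"] else inp) := by
  induction inp using pvChunk2.induct with
  | case1 a b rest ih =>
      intro temp
      have h2 : (rest.length + 1 + 1) % 2 = rest.length % 2 := by omega
      simp only [List.foldl_cons, List.length_cons, List.length_nil, h2,
        reduceIte, List.nil_append, Nat.add_one_ne_zero, List.singleton_append]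
      have := ih (temp ++ [[a, b]])
      dsimp only at this
      rw [this]
      by_cases h : rest.length % 2 = 1 <;> simp [h, pvChunk2]
  | case2 a =>
      intro temp
      simp [pvChunk2]
  | case3 =>
      intro temp
      simp [pvChunk2]

-- ===== VERDICT (by name: the statement is the Claim_ definition above) =====
theorem split_into_bigrams_py_spec : Claim_equal_split_into_bigrams_py := by
  intro inp _
  unfold Spec_split_into_bigrams_py split_into_bigrams_py split_into_bigrams_py_alt
  simpa using pv_key inp []
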